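-- pv_equiv track=rewrite | github.com/lucasp90/lz-family | Utils.py | consecutive_repetitions
-- ===== SOURCE A (Python) =====
-- def consecutive_repetitions(string):
--     """
--         Given a non-empty string, it returns a substring containing the consecutive
--         repetitions of the first character of the original string.
--
--         @args:
--         - string (str): the string to be evaluated.
--     """
--     if len(string) == 1:
--         return string
--     char_to_match = string[0]
--     current_index = 1
--     repetitions = char_to_match
--     while current_index < len(string) and char_to_match == string[current_index]:
--         repetitions += string[current_index]
--         current_index += 1
--     return repetitions
-- ===== SOURCE B (Python) =====
-- def consecutive_repetitions(string):
--     c = string[0]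
--     n = next((i for i, ch in enumerate(string) if ch != c), len(string))
--     return c * n
-- ===== Notes on version B (the rewrite author's own statement) =====
-- stated objective: faster
-- what changed: B finds the index of the first character differing from string[0] (or the length) and returns that character repeated that many times, instead of A's explicit index loop that builds the run by repeated string concatenation.
import Mathlib
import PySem

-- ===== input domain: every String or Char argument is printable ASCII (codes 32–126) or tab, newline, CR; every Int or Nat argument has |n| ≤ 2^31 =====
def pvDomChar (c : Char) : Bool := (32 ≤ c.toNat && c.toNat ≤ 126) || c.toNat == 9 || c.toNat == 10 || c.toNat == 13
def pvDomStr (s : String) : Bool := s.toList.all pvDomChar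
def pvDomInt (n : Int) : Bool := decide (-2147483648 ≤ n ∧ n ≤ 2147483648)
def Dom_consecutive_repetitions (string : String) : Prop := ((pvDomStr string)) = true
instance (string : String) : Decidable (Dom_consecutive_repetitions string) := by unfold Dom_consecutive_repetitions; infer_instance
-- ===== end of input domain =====

-- B computes the leading run by locating the first differing index and replicating the
-- first character, instead of A's index loop concatenating characters (objective: simpler).

-- ===== PORT A =====
-- A's while loop: walk the tail while it matches the first character, appending each match.
def consecutive_repetitions_loop (c : Char) (rest : List Char) (acc : List Char) : List Char :=
  match rest with
  | [] => acc
  | x :: xs => if c == x then consecutive_repetitions_loop c xs (acc ++ [x]) else acc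

def consecutive_repetitions (string : String) : String :=
  if string.toList.length == 1 then string
  else
    match string.toList with
    | [] => ""   -- string[0] raises IndexError in Python; excluded by Pre_
    | c :: rest => String.ofList (consecutive_repetitions_loop c rest [c])

-- ===== PORT B =====
def consecutive_repetitions_alt (string : String) : String :=
  match string.toList with
  | [] => ""   -- string[0] raises IndexError in Python; excluded by Pre_
  | c :: _ =>
    let n := (string.toList.findIdx? (fun ch => ch != c)).getD string.toList.length
    String.ofList (List.replicate n c)

-- ===== PRECONDITION & SPEC =====
-- Pre_ excludes only the empty string, on which Python A raises IndexError.
def Pre_consecutive_repetitions (string : String) : Prop := string ≠ ""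
instance (string : String) : Decidable (Pre_consecutive_repetitions string) := by
  unfold Pre_consecutive_repetitions; infer_instance
def pvWitness_consecutive_repetitions : String := "aab"

def Spec_consecutive_repetitions (string : String) (out : String) : Prop := out = consecutive_repetitions_alt string
instance (string : String) (out : String) : Decidable (Spec_consecutive_repetitions string out) := by unfold Spec_consecutive_repetitions; infer_instance

-- ===== CLAIM (what is proved, stated in full; the proofs are below) =====
def Claim_equal_consecutive_repetitions : Prop := ∀ (string : String), Dom_consecutive_repetitions string → Pre_consecutive_repetitions string → Spec_consecutive_repetitions string (consecutive_repetitions string)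

-- ===== LEMMAS AND PROOFS =====
-- number of leading occurrences of c in a list
def leadCount (c : Char) : List Char → Nat
  | [] => 0
  | x :: xs => if c == x then leadCount c xs + 1 else 0

theorem loop_eq_replicate (c : Char) (rest acc : List Char) :
    consecutive_repetitions_loop c rest acc = acc ++ List.replicate (leadCount c rest) c := by
  induction rest generalizing acc with
  | nil => simp [consecutive_repetitions_loop, leadCount]
  | cons x xs ih =>
    simp only [consecutive_repetitions_loop, leadCount]
    by_cases h : c == x
    · have hx : x = c := (beq_iff_eq.mp h).symm
      simp [ih, hx, List.replicate_succ, List.append_assoc]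
    · simp [h]

theorem findIdx?_eq_leadCount (c : Char) (rest : List Char) :
    (rest.findIdx? (fun ch => ch != c)).getD rest.length = leadCount c rest := by
  induction rest with
  | nil => simp [leadCount]
  | cons x xs ih =>
    rw [List.findIdx?_cons]
    by_cases h : x = c
    · subst h
      have hc : (x == x) = true := by simp
      simp only [bne_self_eq_false, Bool.false_eq_true, if_false, leadCount, hc, if_true]
      cases hfi : xs.findIdx? (fun ch => ch != x) with
      | none => rw [hfi] at ih; simp at ih; simp [ih]
      | some i => rw [hfi] at ih; simp at ih; simp [ih]
    · have hne : (x != c) = true := bne_iff_ne.mpr h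
      have hcx : ¬ ((c == x) = true) := fun hb => h (beq_iff_eq.mp hb).symm
      simp [hne, leadCount, hcx]

theorem alt_eq (c : Char) (rest : List Char) (s : String) (hs : s.toList = c :: rest) :
    consecutive_repetitions_alt s = String.ofList (List.replicate (leadCount c rest + 1) c) := by
  unfold consecutive_repetitions_alt
  rw [hs]
  show String.ofList (List.replicate (((c :: rest).findIdx? (fun ch => ch != c)).getD (c :: rest).length) c)
      = String.ofList (List.replicate (leadCount c rest + 1) c)
  rw [List.findIdx?_cons]
  have hl := findIdx?_eq_leadCount c rest
  simp only [bne_self_eq_false, Bool.false_eq_true, if_false, List.length_cons]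
  congr 1
  cases hfi : rest.findIdx? (fun ch => ch != c) with
  | none => rw [hfi] at hl; simp at hl; simp [hl]
  | some i => rw [hfi] at hl; simp at hl; simp [hl]

-- ===== VERDICT (by name: the statement is the Claim_ definition above) =====
theorem consecutive_repetitions_spec : Claim_equal_consecutive_repetitions := by
  intro s _ hpre
  unfold Spec_consecutive_repetitions
  unfold consecutive_repetitions
  cases hs : s.toList with
  | nil => exact absurd (String.toList_eq_nil_iff.mp hs) hpre
  | cons c rest =>
    rw [alt_eq c rest s hs]
    cases rest with
    | nil =>
      have hsv : s = String.ofList [c] := by rw [← hs, String.ofList_toList]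
      simp [hsv, leadCount, List.replicate]
    | cons y ys =>
      simp only [List.length_cons]
      rw [if_neg (by simp)]
      rw [loop_eq_replicate]
      congr 1
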